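-- pv_equiv track=rewrite | github.com/lexsf/OpenSage | src/opensage/toolbox/general/string_utils.py | indentation_flexible_replacer
-- ===== SOURCE A (Python) =====
-- from typing import Callable, Generator, List, Optional, Tuple
--
-- def indentation_flexible_replacer(
--     content: str, find: str
-- ) -> Generator[str, None, None]:
--     """Strategy 5: Remove common indentation, then match.
--
--     Handles cases where the entire block is indented differently.
--     """
--     import textwrap
--
--     def remove_indentation(text: str) -> str:
--         lines = text.split("\n")
--         non_empty_lines = [line for line in lines if line.strip()]
--         if not non_empty_lines:
--             return text
--
--         min_indent = min(len(line) - len(line.lstrip()) for line in non_empty_lines)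
--         return "\n".join(
--             line if not line.strip() else line[min_indent:] for line in lines
--         )
--
--     normalized_find = remove_indentation(find)
--     content_lines = content.split("\n")
--     find_lines = find.split("\n")
--
--     for i in range(len(content_lines) - len(find_lines) + 1):
--         block = "\n".join(content_lines[i : i + len(find_lines)])
--         if remove_indentation(block) == normalized_find:
--             yield block
-- ===== SOURCE B (Python) =====
-- def indentation_flexible_replacer(content, find):
--     """Strategy 5 rewrite: derive the dedent offset per window from line-length
--     differences against the pre-normalized find lines instead of re-joining,
--     re-splitting and re-dedenting every window."""
--     find_lines = find.split("\n")
--     k = len(find_lines)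
--
--     non_empty = [l for l in find_lines if l.strip()]
--     if non_empty:
--         fm = min(len(l) - len(l.lstrip()) for l in non_empty)
--         F = [l if not l.strip() else l[fm:] for l in find_lines]
--     else:
--         F = find_lines
--
--     def window_matches(window):
--         m = None
--         for l, f in zip(window, F):
--             if not l.strip():
--                 if l != f:
--                     return False
--             else:
--                 cand = len(l) - len(f)
--                 if (cand < 0 or l[cand:] != f
--                         or (cand > 0 and not l[:cand].isspace())
--                         or (m is not None and m != cand)):
--                     return False
--                 m = cand
--         return True
--
--     suffix = content.split("\n")
--     while len(suffix) >= k: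
--         window = suffix[:k]
--         if window_matches(window):
--             yield "\n".join(window)
--         suffix = suffix[1:]
-- ===== Notes on version B (the rewrite author's own statement) =====
-- stated objective: faster
-- what changed: Instead of joining, re-splitting and re-dedenting every window, B normalizes find once into a line list and checks each window line-by-line, deriving the dedent offset from the line-length difference against the normalized find line (plus a whitespace-prefix check), with early exit on the first mismatching line.
import Mathlib
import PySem

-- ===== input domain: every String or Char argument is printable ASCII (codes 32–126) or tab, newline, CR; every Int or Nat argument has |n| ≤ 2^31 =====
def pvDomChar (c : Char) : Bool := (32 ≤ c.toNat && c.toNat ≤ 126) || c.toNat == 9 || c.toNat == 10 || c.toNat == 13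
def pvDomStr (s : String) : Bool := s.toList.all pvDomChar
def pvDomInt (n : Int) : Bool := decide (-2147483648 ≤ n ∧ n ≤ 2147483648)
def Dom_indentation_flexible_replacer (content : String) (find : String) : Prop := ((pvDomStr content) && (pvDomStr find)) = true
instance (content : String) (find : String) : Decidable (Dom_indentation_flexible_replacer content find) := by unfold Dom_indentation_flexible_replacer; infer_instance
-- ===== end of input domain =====

-- B re-implements the window search: it normalizes `find` once into a line list and checks each
-- window line-by-line, deriving the dedent offset from line-length differences against the
-- normalized find lines, instead of joining, re-splitting and re-dedenting every window.

-- ===== PORT A =====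
-- `min(...)` inside remove_indentation is guarded by the non-empty check, so `.getD 0` is never used
def pvRemoveIndentation (text : String) : String :=
  let lines := (PySem.Str.split? text "\n").getD []
  let nonEmptyLines := lines.filter (fun line => PySem.Str.strip line != "")
  if nonEmptyLines = [] then text
  else
    let minIndent := (PySem.List.min?
        (nonEmptyLines.map (fun line => PySem.Str.len line - PySem.Str.len (PySem.Str.lstrip line)))
        (fun x => x)).getD 0
    PySem.Str.join "\n" (lines.map (fun line =>
      if PySem.Str.strip line == "" then line else PySem.Str.slice line (some minIndent) none))

def indentation_flexible_replacer (content : String) (find : String) : List String :=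
  let normalizedFind := pvRemoveIndentation find
  let contentLines := (PySem.Str.split? content "\n").getD []
  let findLines := (PySem.Str.split? find "\n").getD []
  (PySem.List.pyRange 0 (PySem.List.len contentLines - PySem.List.len findLines + 1) 1).foldl
    (fun acc i =>
      let block := PySem.Str.join "\n"
        (PySem.List.slice contentLines (some i) (some (i + PySem.List.len findLines)))
      if pvRemoveIndentation block == normalizedFind then acc ++ [block] else acc) []

-- ===== PORT B =====
def pvWindowMatches : Option Int → List (String × String) → Bool
  | _, [] => true
  | m, (l, f) :: rest =>
    if PySem.Str.strip l == "" then
      if l == f then pvWindowMatches m rest else false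
    else
      let cand := PySem.Str.len l - PySem.Str.len f
      if cand < 0 then false
      else if PySem.Str.slice l (some cand) none != f then false
      else if cand > 0 && !(PySem.Str.strIsspace (PySem.Str.slice l none (some cand))) then false
      else match m with
        | some v => if v == cand then pvWindowMatches (some v) rest else false
        | none => pvWindowMatches (some cand) rest

def pvNormalizeFind (findLines : List String) : List String :=
  let nonEmpty := findLines.filter (fun l => PySem.Str.strip l != "")
  if nonEmpty = [] then findLines
  else
    let fm := (PySem.List.min?
        (nonEmpty.map (fun l => PySem.Str.len l - PySem.Str.len (PySem.Str.lstrip l)))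
        (fun x => x)).getD 0
    findLines.map (fun l =>
      if PySem.Str.strip l == "" then l else PySem.Str.slice l (some fm) none)

def pvScan (F : List String) : List String → List String
  | [] => []
  | l :: rest =>
    if F.length ≤ (l :: rest).length then
      let window := (l :: rest).take F.length
      (if pvWindowMatches none (window.zip F) then [PySem.Str.join "\n" window] else [])
        ++ pvScan F rest
    else []

def indentation_flexible_replacer_alt (content : String) (find : String) : List String :=
  let findLines := (PySem.Str.split? find "\n").getD []
  let F := pvNormalizeFind findLines
  pvScan F ((PySem.Str.split? content "\n").getD [])




-- ===== PRECONDITION & SPEC =====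
def Spec_indentation_flexible_replacer (content : String) (find : String) (out : List String) : Prop := out = indentation_flexible_replacer_alt content find
instance (content : String) (find : String) (out : List String) : Decidable (Spec_indentation_flexible_replacer content find out) := by unfold Spec_indentation_flexible_replacer; infer_instance

-- ===== CLAIM (what is proved, stated in full; the proofs are below) =====
def Claim_equal_indentation_flexible_replacer : Prop := ∀ (content : String) (find : String), Dom_indentation_flexible_replacer content find → Spec_indentation_flexible_replacer content find (indentation_flexible_replacer content find)

-- ===== LEMMAS AND PROOFS =====

-- structural single-char splitter
def pvSplitC (c : Char) : List Char → List (List Char)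
  | [] => [[]]
  | x :: xs =>
    match pvSplitC c xs with
    | [] => []
    | y :: ys => if x = c then [] :: y :: ys else (x :: y) :: ys

def pvPrepend (w : List Char) : List (List Char) → List (List Char)
  | [] => [w]
  | y :: ys => (w ++ y) :: ys

theorem pvSplitC_ne_nil (c : Char) (s : List Char) : pvSplitC c s ≠ [] := by
  induction s with
  | nil => simp [pvSplitC]
  | cons x xs ih =>
    simp only [pvSplitC]
    cases h : pvSplitC c xs with
    | nil => exact absurd h ih
    | cons y ys => simp only []; split <;> simp

theorem pvGo_eq (c : Char) : ∀ (fuel : Nat) (l cur : List Char) (acc : List (List Char)),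
    l.length < fuel →
    PySem.Chars.splitOn.go [c] fuel l cur acc = acc.reverse ++ pvPrepend cur.reverse (pvSplitC c l) := by
  intro fuel
  induction fuel with
  | zero => intro l cur acc h; omega
  | succ n ih =>
    intro l cur acc h
    cases l with
    | nil =>
      rw [PySem.Chars.splitOn.go.eq_def]
      simp [pvSplitC, pvPrepend]
    | cons x rest =>
      rw [PySem.Chars.splitOn.go.eq_def]
      simp only []
      by_cases hx : x = c
      · subst hx
        have hpre : [x].isPrefixOf (x :: rest) = true := by simp [List.isPrefixOf]
        simp only [hpre, if_pos, List.length_cons, List.length_nil, List.drop_succ_cons, List.drop_zero]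
        rw [ih rest [] (cur.reverse :: acc) (by simpa using Nat.lt_of_succ_lt_succ h)]
        simp only [pvSplitC]
        cases hs : pvSplitC x rest with
        | nil => exact absurd hs (pvSplitC_ne_nil x rest)
        | cons y ys => simp [pvPrepend]
      · have hpre : [c].isPrefixOf (x :: rest) = false := by
          simp [List.isPrefixOf]; exact fun hvc => absurd hvc.symm hx
        simp only [hpre, Bool.false_eq_true, if_false]
        rw [ih rest (x :: cur) acc (by simpa using Nat.lt_of_succ_lt_succ h)]
        simp only [pvSplitC]
        cases hs : pvSplitC c rest with
        | nil => exact absurd hs (pvSplitC_ne_nil c rest)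
        | cons y ys =>
          have : (x = c) = False := by simp [hx]
          simp [this, pvPrepend]

theorem pvSplitOn_eq (c : Char) (s : List Char) :
    PySem.Chars.splitOn s [c] = pvSplitC c s := by
  unfold PySem.Chars.splitOn
  rw [pvGo_eq c (s.length + 1) s [] [] (by omega)]
  cases hs : pvSplitC c s with
  | nil => exact absurd hs (pvSplitC_ne_nil c s)
  | cons y ys => simp [pvPrepend]

theorem pv_not_mem_of_mem_pvSplitC {c : Char} {s : List Char} {p : List Char}
    (h : p ∈ pvSplitC c s) : c ∉ p := by
  induction s generalizing p with
  | nil => simp [pvSplitC] at h; simp [h]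
  | cons x xs ih =>
    simp only [pvSplitC] at h
    cases hs : pvSplitC c xs with
    | nil => exact absurd hs (pvSplitC_ne_nil c xs)
    | cons y ys =>
      rw [hs] at h
      simp only [] at h
      by_cases hx : x = c
      · rw [if_pos hx] at h
        rcases List.mem_cons.mp h with h1 | h1
        · simp [h1]
        · exact ih (hs ▸ h1)
      · rw [if_neg hx] at h
        rcases List.mem_cons.mp h with h1 | h1
        · subst h1
          intro hc
          rcases List.mem_cons.mp hc with h2 | h2
          · exact hx h2.symm
          · exact ih (hs ▸ List.mem_cons_self ..) h2
        · exact ih (hs ▸ List.mem_cons.mpr (Or.inr h1))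

theorem pvJoin_pvSplitC (c : Char) (s : List Char) :
    PySem.Chars.join [c] (pvSplitC c s) = s := by
  induction s with
  | nil => simp [pvSplitC, PySem.Chars.join_singleton]
  | cons x xs ih =>
    simp only [pvSplitC]
    cases hs : pvSplitC c xs with
    | nil => exact absurd hs (pvSplitC_ne_nil c xs)
    | cons y ys =>
      rw [hs] at ih
      simp only []
      by_cases hx : x = c
      · subst hx
        rw [if_pos rfl, PySem.Chars.join_cons_cons]
        simp [ih]
      · rw [if_neg hx]
        cases ys with
        | nil =>
          rw [PySem.Chars.join_singleton] at ih ⊢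
          simp [ih]
        | cons z zs =>
          rw [PySem.Chars.join_cons_cons] at ih ⊢
          simp [ih]

theorem pvSplitC_append_of_not_mem {c : Char} {w : List Char} (l : List Char)
    (hw : c ∉ w) : pvSplitC c (w ++ l) = pvPrepend w (pvSplitC c l) := by
  induction w with
  | nil =>
    cases hs : pvSplitC c l with
    | nil => exact absurd hs (pvSplitC_ne_nil c l)
    | cons y ys => simpa [pvPrepend] using hs
  | cons x xs ih =>
    have hx : x ≠ c := fun h => hw (h ▸ List.mem_cons_self ..)
    have hxs : c ∉ xs := fun h => hw (List.mem_cons.mpr (Or.inr h))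
    simp only [List.cons_append, pvSplitC, ih hxs]
    cases hs : pvSplitC c l with
    | nil => exact absurd hs (pvSplitC_ne_nil c l)
    | cons y ys => simp [pvPrepend, hx]

theorem pvSplitC_join {c : Char} : ∀ (xs : List (List Char)), xs ≠ [] →
    (∀ x ∈ xs, c ∉ x) → pvSplitC c (PySem.Chars.join [c] xs) = xs := by
  intro xs
  induction xs with
  | nil => intro h; exact absurd rfl h
  | cons a rest ih =>
    intro _ hmem
    cases rest with
    | nil =>
      rw [PySem.Chars.join_singleton]
      have := pvSplitC_append_of_not_mem (c := c) [] (hmem a (by simp))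
      simpa [pvSplitC, pvPrepend] using this
    | cons b t =>
      rw [PySem.Chars.join_cons_cons]
      have hmem' : ∀ x ∈ b :: t, c ∉ x := fun x hx => hmem x (List.mem_cons.mpr (Or.inr hx))
      have ihr := ih (by simp) hmem'
      have : pvSplitC c (a ++ ([c] ++ PySem.Chars.join [c] (b :: t)))
          = pvPrepend a (pvSplitC c ([c] ++ PySem.Chars.join [c] (b :: t))) :=
        pvSplitC_append_of_not_mem _ (hmem a (by simp))
      rw [List.append_assoc, this]
      have : pvSplitC c ([c] ++ PySem.Chars.join [c] (b :: t))
          = [] :: pvSplitC c (PySem.Chars.join [c] (b :: t)) := by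
        simp only [List.singleton_append, pvSplitC]
        cases hs : pvSplitC c (PySem.Chars.join [c] (b :: t)) with
        | nil => exact absurd hs (pvSplitC_ne_nil c _)
        | cons y ys => simp
      rw [this, ihr]
      simp [pvPrepend]

-- ===== String-level =====

def pvLines (s : String) : List String := (PySem.Str.split? s "\n").getD []

theorem pvLines_eq (s : String) :
    pvLines s = (pvSplitC '\n' s.toList).map String.ofList := by
  simp only [pvLines, PySem.Str.split?, PySem.Chars.split?]
  have : ("\n" : String).toList = ['\n'] := by decide
  rw [this]
  simp [pvSplitOn_eq]

theorem pvLines_ne_nil (s : String) : pvLines s ≠ [] := by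
  rw [pvLines_eq]
  simpa using pvSplitC_ne_nil '\n' s.toList

theorem pv_noNL_of_mem_pvLines {s : String} {l : String} (h : l ∈ pvLines s) :
    '\n' ∉ l.toList := by
  rw [pvLines_eq] at h
  rcases List.mem_map.mp h with ⟨p, hp, rfl⟩
  rw [String.toList_ofList]
  exact pv_not_mem_of_mem_pvSplitC hp

theorem pvJoin_toList (W : List String) :
    (PySem.Str.join "\n" W).toList = PySem.Chars.join ['\n'] (W.map String.toList) := by
  rw [PySem.Str.toList_join]
  congr 1

theorem pvLines_join (W : List String) (hne : W ≠ [])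
    (hnl : ∀ w ∈ W, '\n' ∉ w.toList) : pvLines (PySem.Str.join "\n" W) = W := by
  rw [pvLines_eq, pvJoin_toList]
  rw [pvSplitC_join (W.map String.toList) (by simpa using hne)
    (by intro x hx; rcases List.mem_map.mp hx with ⟨w, hw, rfl⟩; exact hnl w hw)]
  simp [List.map_map, Function.comp_def]

theorem pvJoin_inj {W V : List String} (hW : W ≠ []) (hV : V ≠ [])
    (hnW : ∀ w ∈ W, '\n' ∉ w.toList) (hnV : ∀ v ∈ V, '\n' ∉ v.toList)
    (h : PySem.Str.join "\n" W = PySem.Str.join "\n" V) : W = V := by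
  have := congrArg pvLines h
  rwa [pvLines_join W hW hnW, pvLines_join V hV hnV] at this

-- ===== whitespace / indent toolbox (String level, proved on toList) =====

def pvNEb (l : String) : Bool := PySem.Str.strip l != ""
def pvInd (l : String) : Int := PySem.Str.len l - PySem.Str.len (PySem.Str.lstrip l)

theorem pvInd_eq (l : String) :
    pvInd l = ((l.toList.takeWhile PySem.Chars.isspace).length : Int) := by
  have hsplit := List.takeWhile_append_dropWhile (p := PySem.Chars.isspace) (l := l.toList)
  have hlen : (l.toList.takeWhile PySem.Chars.isspace).length
      + (l.toList.dropWhile PySem.Chars.isspace).length = l.toList.length := by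
    rw [← List.length_append, hsplit]
  simp only [pvInd, PySem.Str.len_eq, PySem.Str.toList_lstrip, PySem.Chars.lstrip]
  omega

theorem pvInd_nonneg (l : String) : 0 ≤ pvInd l := by
  rw [pvInd_eq]; positivity

theorem pvInd_le_len (l : String) : pvInd l ≤ (l.toList.length : Int) := by
  rw [pvInd_eq]
  exact_mod_cast (List.takeWhile_sublist _).length_le

theorem pv_takeWhile_isspace (l : String) :
    ∀ c ∈ l.toList.takeWhile PySem.Chars.isspace, PySem.Chars.isspace c := by
  intro c hc; exact List.mem_takeWhile_imp hc

theorem pv_strip_eq_nil_iff (cs : List Char) :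
    PySem.Chars.strip cs = [] ↔ ∀ c ∈ cs, PySem.Chars.isspace c := by
  constructor
  · intro h c hc
    by_contra hns
    simp only [PySem.Chars.strip, PySem.Chars.rstrip, PySem.Chars.lstrip] at h
    have h2 : ∀ x ∈ (cs.dropWhile PySem.Chars.isspace).reverse, PySem.Chars.isspace x := by
      have := List.reverse_eq_nil_iff.mp h
      exact List.dropWhile_eq_nil_iff.mp this
    have h3 : ∀ x ∈ cs.dropWhile PySem.Chars.isspace, PySem.Chars.isspace x := by
      intro x hx; exact h2 x (List.mem_reverse.mpr hx)
    have h4 : ∀ x ∈ cs.takeWhile PySem.Chars.isspace, PySem.Chars.isspace x :=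
      fun x hx => List.mem_takeWhile_imp hx
    have : ∀ x ∈ cs, PySem.Chars.isspace x := by
      intro x hx
      rw [← List.takeWhile_append_dropWhile (p := PySem.Chars.isspace) (l := cs)] at hx
      rcases List.mem_append.mp hx with h | h
      · exact h4 x h
      · exact h3 x h
    exact hns (this c hc)
  · intro h
    simp only [PySem.Chars.strip, PySem.Chars.rstrip, PySem.Chars.lstrip]
    have h1 : cs.dropWhile PySem.Chars.isspace = [] := List.dropWhile_eq_nil_iff.mpr h
    simp [h1]

theorem pvNEb_false_iff (l : String) :
    pvNEb l = false ↔ ∀ c ∈ l.toList, PySem.Chars.isspace c := by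
  have : (PySem.Str.strip l = "") ↔ (PySem.Str.strip l).toList = [] := by
    constructor
    · intro h; rw [h]; rfl
    · intro h
      have := congrArg String.ofList h
      rwa [String.ofList_toList] at this
  simp only [pvNEb, bne_eq_false_iff_eq, ← pv_strip_eq_nil_iff, ← PySem.Str.toList_strip]
  exact ⟨fun h => this.mp h, fun h => this.mpr h⟩

theorem pvSliceFrom_toList (l : String) (m : Int) (hm : 0 ≤ m) :
    (PySem.Str.slice l (some m) none).toList = l.toList.drop m.toNat := by
  rw [PySem.Str.toList_slice, PySem.Chars.slice_eq_listSlice]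
  exact PySem.List.slice_from _ hm

theorem pvSliceTo_toList (l : String) (m : Int) (hm : 0 ≤ m) :
    (PySem.Str.slice l none (some m)).toList = l.toList.take m.toNat := by
  rw [PySem.Str.toList_slice, PySem.Chars.slice_eq_listSlice]
  exact PySem.List.slice_to _ hm

theorem pvNEb_true_iff (l : String) :
    pvNEb l = true ↔ ∃ c ∈ l.toList, ¬ PySem.Chars.isspace c := by
  rw [← Bool.not_eq_false, pvNEb_false_iff]
  push_neg
  simp

theorem pvStrIsspace_iff (s : String) :
    PySem.Str.strIsspace s = true ↔ s.toList ≠ [] ∧ ∀ c ∈ s.toList, PySem.Chars.isspace c := by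
  rw [PySem.Str.strIsspace_eq]
  simp [PySem.Chars.strIsspace, List.isEmpty_iff, List.all_eq_true]

-- dedent effect: slicing away m ≤ indent leading characters
theorem pvDedent_spec (l : String) (m : Int) (h0 : 0 ≤ m) (hle : m ≤ pvInd l) :
    pvNEb (PySem.Str.slice l (some m) none) = pvNEb l ∧
    pvInd (PySem.Str.slice l (some m) none) = pvInd l - m ∧
    PySem.Str.len (PySem.Str.slice l (some m) none) = PySem.Str.len l - m ∧
    (∀ c ∈ l.toList.take m.toNat, PySem.Chars.isspace c) := by
  have htl := pvSliceFrom_toList l m h0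
  have hind := pvInd_eq l
  have hlen := pvInd_le_len l
  -- the first m chars are within the whitespace prefix
  have hmn : m.toNat ≤ (l.toList.takeWhile PySem.Chars.isspace).length := by omega
  have htake : l.toList.take m.toNat = (l.toList.takeWhile PySem.Chars.isspace).take m.toNat := by
    conv_lhs => rw [← List.takeWhile_append_dropWhile (p := PySem.Chars.isspace) (l := l.toList)]
    rw [List.take_append_of_le_length hmn]
  have hspace : ∀ c ∈ l.toList.take m.toNat, PySem.Chars.isspace c := by
    intro c hc
    rw [htake] at hc
    exact pv_takeWhile_isspace l c (List.take_subset _ _ hc)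
  have hdropw : (l.toList.drop m.toNat).takeWhile PySem.Chars.isspace
      = (l.toList.takeWhile PySem.Chars.isspace).drop m.toNat := by
    conv_lhs => rw [← List.takeWhile_append_dropWhile (p := PySem.Chars.isspace) (l := l.toList)]
    rw [List.drop_append_of_le_length hmn]
    rw [List.takeWhile_append_of_pos (fun x hx => pv_takeWhile_isspace l x (List.drop_subset _ _ hx))]
    congr 1
    cases hd : l.toList.dropWhile PySem.Chars.isspace with
    | nil => simp
    | cons c t =>
      have hne : l.toList.dropWhile PySem.Chars.isspace ≠ [] := by simp [hd]
      have hc := List.head_dropWhile_not (p := PySem.Chars.isspace) (l := l.toList) hne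
      have hc' : PySem.Chars.isspace c = false := by
        have : (l.toList.dropWhile PySem.Chars.isspace).head hne = c := by simp [hd]
        rwa [this] at hc
      simp [List.takeWhile_cons, hc']
  constructor
  · -- NE preserved both ways
    rcases Bool.eq_false_or_eq_true (pvNEb l) with hb | hb
    · rw [hb]
      rcases (pvNEb_true_iff l).mp hb with ⟨c, hc, hcs⟩
      rw [pvNEb_true_iff]
      refine ⟨c, ?_, hcs⟩
      rw [htl]
      rw [← List.take_append_drop m.toNat l.toList] at hc
      rcases List.mem_append.mp hc with h | h
      · exact absurd (hspace c h) hcs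
      · exact h
    · rw [hb]
      rw [pvNEb_false_iff] at hb ⊢
      intro c hc
      rw [htl] at hc
      exact hb c (List.drop_subset _ _ hc)
  refine ⟨?_, ?_, hspace⟩
  · rw [pvInd_eq, htl, hdropw, List.length_drop, pvInd_eq]
    omega
  · simp only [PySem.Str.len_eq, htl, List.length_drop]
    omega

-- recompose: from B's per-line checks back to structure
theorem pvRecompose (l f : String) (m : Int) (h0 : 0 ≤ m)
    (hsl : PySem.Str.slice l (some m) none = f)
    (hpre : m = 0 ∨ PySem.Str.strIsspace (PySem.Str.slice l none (some m)) = true)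
    (hNE : pvNEb l = true) :
    pvNEb f = true ∧ pvInd l = m + pvInd f ∧ m ≤ pvInd l := by
  have htl : f.toList = l.toList.drop m.toNat := by rw [← hsl, pvSliceFrom_toList l m h0]
  have hspace : ∀ c ∈ l.toList.take m.toNat, PySem.Chars.isspace c := by
    rcases hpre with h | h
    · subst h; simp
    · rw [pvStrIsspace_iff, pvSliceTo_toList l m h0] at h
      exact h.2
  have hNEf : pvNEb f = true := by
    rcases (pvNEb_true_iff l).mp hNE with ⟨c, hc, hcs⟩
    rw [pvNEb_true_iff]
    refine ⟨c, ?_, hcs⟩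
    rw [htl]
    rw [← List.take_append_drop m.toNat l.toList] at hc
    rcases List.mem_append.mp hc with h | h
    · exact absurd (hspace c h) hcs
    · exact h
  have hmlen : m.toNat ≤ l.toList.length := by
    by_contra hgt
    have : f.toList = [] := by rw [htl]; exact List.drop_eq_nil_of_le (by omega)
    have : pvNEb f = false := by
      rw [pvNEb_false_iff, this]; intro c hc; cases hc
    simp [this] at hNEf
  have htw : l.toList.takeWhile PySem.Chars.isspace
      = l.toList.take m.toNat ++ f.toList.takeWhile PySem.Chars.isspace := by
    conv_lhs => rw [← List.take_append_drop m.toNat l.toList]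
    rw [List.takeWhile_append_of_pos hspace, htl]
  have hind : pvInd l = m + pvInd f := by
    rw [pvInd_eq, pvInd_eq, htw, List.length_append, List.length_take]
    push_cast
    omega
  exact ⟨hNEf, hind, by have := pvInd_nonneg f; omega⟩

-- ===== characterization of B's window check =====

def pvCand (p : String × String) : Int := PySem.Str.len p.1 - PySem.Str.len p.2

def pvLineOK (p : String × String) : Prop :=
  if pvNEb p.1 = true then
    0 ≤ pvCand p ∧ PySem.Str.slice p.1 (some (pvCand p)) none = p.2 ∧
      (pvCand p = 0 ∨ PySem.Str.strIsspace (PySem.Str.slice p.1 none (some (pvCand p))) = true)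
  else p.1 = p.2

def pvCands (ps : List (String × String)) : List Int :=
  (ps.filter (fun p => pvNEb p.1)).map pvCand

-- head-step equations for pvWindowMatches
theorem pvStep_empty_eq {l f : String} {rest : List (String × String)} {m : Option Int}
    (h1 : (PySem.Str.strip l == "") = true) (hlf : l = f) :
    pvWindowMatches m ((l, f) :: rest) = pvWindowMatches m rest := by
  show (if PySem.Str.strip l == "" then _ else _) = _
  rw [h1]
  simp [hlf]

theorem pvStep_empty_ne {l f : String} {rest : List (String × String)} {m : Option Int}
    (h1 : (PySem.Str.strip l == "") = true) (hlf : l ≠ f) :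
    pvWindowMatches m ((l, f) :: rest) = false := by
  show (if PySem.Str.strip l == "" then _ else _) = _
  rw [h1]
  simp [hlf]

theorem pvStep_neg {l f : String} {rest : List (String × String)} {m : Option Int}
    (h1 : (PySem.Str.strip l == "") = false)
    (h2 : PySem.Str.len l - PySem.Str.len f < 0) :
    pvWindowMatches m ((l, f) :: rest) = false := by
  show (if PySem.Str.strip l == "" then _ else _) = _
  rw [h1]
  show (if PySem.Str.len l - PySem.Str.len f < 0 then _ else _) = _
  rw [if_pos h2]

theorem pvStep_badslice {l f : String} {rest : List (String × String)} {m : Option Int}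
    (h1 : (PySem.Str.strip l == "") = false)
    (h2 : ¬ (PySem.Str.len l - PySem.Str.len f < 0))
    (h3 : (PySem.Str.slice l (some (PySem.Str.len l - PySem.Str.len f)) none != f) = true) :
    pvWindowMatches m ((l, f) :: rest) = false := by
  show (if PySem.Str.strip l == "" then _ else _) = _
  rw [h1]
  show (if PySem.Str.len l - PySem.Str.len f < 0 then _ else _) = _
  rw [if_neg h2]
  show (if (_ != _) = true then _ else _) = _
  rw [h3]
  simp

theorem pvStep_badpre {l f : String} {rest : List (String × String)} {m : Option Int}
    (h1 : (PySem.Str.strip l == "") = false)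
    (h2 : ¬ (PySem.Str.len l - PySem.Str.len f < 0))
    (h3 : (PySem.Str.slice l (some (PySem.Str.len l - PySem.Str.len f)) none != f) = false)
    (h4 : ((PySem.Str.len l - PySem.Str.len f > 0 : Bool) &&
        !(PySem.Str.strIsspace (PySem.Str.slice l none (some (PySem.Str.len l - PySem.Str.len f))))) = true) :
    pvWindowMatches m ((l, f) :: rest) = false := by
  show (if PySem.Str.strip l == "" then _ else _) = _
  rw [h1]
  show (if PySem.Str.len l - PySem.Str.len f < 0 then _ else _) = _
  rw [if_neg h2]
  show (if (_ != _) = true then _ else _) = _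
  rw [h3]
  show (if (_ && _) = true then _ else _) = _
  rw [h4]
  simp

theorem pvStep_none {l f : String} {rest : List (String × String)}
    (h1 : (PySem.Str.strip l == "") = false)
    (h2 : ¬ (PySem.Str.len l - PySem.Str.len f < 0))
    (h3 : (PySem.Str.slice l (some (PySem.Str.len l - PySem.Str.len f)) none != f) = false)
    (h4 : ((PySem.Str.len l - PySem.Str.len f > 0 : Bool) &&
        !(PySem.Str.strIsspace (PySem.Str.slice l none (some (PySem.Str.len l - PySem.Str.len f))))) = false) :
    pvWindowMatches none ((l, f) :: rest)
      = pvWindowMatches (some (PySem.Str.len l - PySem.Str.len f)) rest := by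
  show (if PySem.Str.strip l == "" then _ else _) = _
  rw [h1]
  show (if PySem.Str.len l - PySem.Str.len f < 0 then _ else _) = _
  rw [if_neg h2]
  show (if (_ != _) = true then _ else _) = _
  rw [h3]
  show (if (_ && _) = true then _ else _) = _
  rw [h4]
  simp

theorem pvStep_some {l f : String} {rest : List (String × String)} {v : Int}
    (h1 : (PySem.Str.strip l == "") = false)
    (h2 : ¬ (PySem.Str.len l - PySem.Str.len f < 0))
    (h3 : (PySem.Str.slice l (some (PySem.Str.len l - PySem.Str.len f)) none != f) = false)
    (h4 : ((PySem.Str.len l - PySem.Str.len f > 0 : Bool) &&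
        !(PySem.Str.strIsspace (PySem.Str.slice l none (some (PySem.Str.len l - PySem.Str.len f))))) = false) :
    pvWindowMatches (some v) ((l, f) :: rest)
      = if v = PySem.Str.len l - PySem.Str.len f then pvWindowMatches (some v) rest else false := by
  show (if PySem.Str.strip l == "" then _ else _) = _
  rw [h1]
  show (if PySem.Str.len l - PySem.Str.len f < 0 then _ else _) = _
  rw [if_neg h2]
  show (if (_ != _) = true then _ else _) = _
  rw [h3]
  show (if (_ && _) = true then _ else _) = _
  rw [h4]
  show (if (_ == _) = true then _ else _) = _
  by_cases hv : v = PySem.Str.len l - PySem.Str.len f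
  · rw [if_pos hv, if_pos (beq_iff_eq.mpr hv)]
  · rw [if_neg hv, if_neg (fun hc => hv (beq_iff_eq.mp hc))]

theorem pvWindowMatches_iff : ∀ (ps : List (String × String)) (m : Option Int),
    pvWindowMatches m ps = true ↔
      (∀ p ∈ ps, pvLineOK p) ∧ (∀ x ∈ pvCands ps, ∀ y ∈ m.toList ++ pvCands ps, x = y) := by
  intro ps
  induction ps with
  | nil => intro m; simp [pvWindowMatches, pvCands]
  | cons hd rest ih =>
    intro m
    obtain ⟨l, f⟩ := hd
    by_cases hne : pvNEb l = true
    · have hstrip : (PySem.Str.strip l == "") = false := by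
        simp only [pvNEb, bne] at hne
        simpa using hne
      have hcands : pvCands ((l, f) :: rest)
          = (PySem.Str.len l - PySem.Str.len f) :: pvCands rest := by
        simp [pvCands, List.filter_cons, hne, pvCand]
      by_cases h2 : PySem.Str.len l - PySem.Str.len f < 0
      · rw [pvStep_neg hstrip h2]
        simp only [Bool.false_eq_true, false_iff]
        rintro ⟨hall, -⟩
        have := hall (l, f) (by simp)
        simp only [pvLineOK, if_pos hne, pvCand] at this
        omega
      · by_cases h3p : PySem.Str.slice l (some (PySem.Str.len l - PySem.Str.len f)) none = f
        · have h3 : (PySem.Str.slice l (some (PySem.Str.len l - PySem.Str.len f)) none != f) = false :=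
            bne_eq_false_iff_eq.mpr h3p
          by_cases h4p : ((PySem.Str.len l - PySem.Str.len f > 0 : Bool) &&
              !(PySem.Str.strIsspace (PySem.Str.slice l none
                (some (PySem.Str.len l - PySem.Str.len f))))) = true
          · rw [pvStep_badpre hstrip h2 h3 h4p]
            simp only [Bool.false_eq_true, false_iff]
            rintro ⟨hall, -⟩
            have hok := hall (l, f) (by simp)
            simp only [pvLineOK, if_pos hne, pvCand] at hok
            rcases Bool.and_eq_true_iff.mp h4p with ⟨ha, hb⟩
            have hgt : 0 < PySem.Str.len l - PySem.Str.len f := by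
              simpa using ha
            have hsp : PySem.Str.strIsspace (PySem.Str.slice l none
                (some (PySem.Str.len l - PySem.Str.len f))) = false := by
              simpa using hb
            rcases hok.2.2 with h | h
            · omega
            · rw [h] at hsp; cases hsp
          · have h4 : ((PySem.Str.len l - PySem.Str.len f > 0 : Bool) &&
                !(PySem.Str.strIsspace (PySem.Str.slice l none
                  (some (PySem.Str.len l - PySem.Str.len f))))) = false :=
              Bool.eq_false_iff.mpr h4p
            have hok : pvLineOK (l, f) := by
              simp only [pvLineOK, if_pos hne, pvCand]
              refine ⟨by omega, h3p, ?_⟩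
              rcases Bool.and_eq_false_iff.mp h4 with h | h
              · left
                have : ¬ (0 : Int) < PySem.Str.len l - PySem.Str.len f := by simpa using h
                omega
              · right; simpa using h
            cases m with
            | none =>
              rw [pvStep_none hstrip h2 h3 h4, ih (some (PySem.Str.len l - PySem.Str.len f)), hcands]
              constructor
              · rintro ⟨hrest, hcons⟩
                have hxv : ∀ z ∈ pvCands rest, z = PySem.Str.len l - PySem.Str.len f :=
                  fun z hz => hcons z hz _ (by simp)
                refine ⟨?_, ?_⟩
                · intro p hp
                  rcases List.mem_cons.mp hp with h | h
                  · exact h ▸ hok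
                  · exact hrest p h
                · intro x hx y hy
                  have hz : ∀ z, z ∈ (PySem.Str.len l - PySem.Str.len f) :: pvCands rest →
                      z = PySem.Str.len l - PySem.Str.len f := by
                    intro z hzm
                    rcases List.mem_cons.mp hzm with h | h
                    · exact h
                    · exact hxv z h
                  simp only [Option.toList_none, List.nil_append] at hy
                  rw [hz x hx, hz y hy]
              · rintro ⟨hall, hcons⟩
                refine ⟨fun p hp => hall p (by simp [hp]), ?_⟩
                intro x hx y hy
                simp only [Option.toList_some, List.singleton_append] at hy
                rcases List.mem_cons.mp hy with hy | hy
                · subst hy; exact hcons x (by simp [hx]) _ (by simp [hcands])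
                · exact hcons x (by simp [hx]) y (by simp [hy])
            | some v =>
              rw [pvStep_some hstrip h2 h3 h4]
              by_cases hv : v = PySem.Str.len l - PySem.Str.len f
              · subst hv
                rw [if_pos rfl, ih (some _), hcands]
                constructor
                · rintro ⟨hrest, hcons⟩
                  have hxv : ∀ z ∈ pvCands rest, z = PySem.Str.len l - PySem.Str.len f :=
                    fun z hz => hcons z hz _ (by simp)
                  refine ⟨?_, ?_⟩
                  · intro p hp
                    rcases List.mem_cons.mp hp with h | h
                    · exact h ▸ hok
                    · exact hrest p h
                  · intro x hx y hy
                    have hz : ∀ z, z ∈ (PySem.Str.len l - PySem.Str.len f) :: pvCands rest →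
                        z = PySem.Str.len l - PySem.Str.len f := by
                      intro z hzm
                      rcases List.mem_cons.mp hzm with h | h
                      · exact h
                      · exact hxv z h
                    have hy' : y = PySem.Str.len l - PySem.Str.len f := by
                      simp only [Option.toList_some, List.singleton_append] at hy
                      rcases List.mem_cons.mp hy with h | h
                      · exact h
                      · exact hz y h
                    rw [hz x hx, hy']
                · rintro ⟨hall, hcons⟩
                  refine ⟨fun p hp => hall p (by simp [hp]), ?_⟩
                  intro x hx y hy
                  exact hcons x (by simp [hcands, hx]) y (by
                    simp only [Option.toList_some, List.singleton_append] at hy ⊢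
                    rcases List.mem_cons.mp hy with h | h
                    · simp [h]
                    · simp [hcands, h])
              · rw [if_neg hv]
                simp only [Bool.false_eq_true, false_iff]
                rintro ⟨-, hcons⟩
                exact hv ((hcons (PySem.Str.len l - PySem.Str.len f) (by simp [hcands]) v
                  (by simp)).symm)
        · have h3 : (PySem.Str.slice l (some (PySem.Str.len l - PySem.Str.len f)) none != f) = true := by
            rcases Bool.eq_false_or_eq_true
              (PySem.Str.slice l (some (PySem.Str.len l - PySem.Str.len f)) none != f) with h | h
            · exact h
            · exact absurd (bne_eq_false_iff_eq.mp h) h3p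
          rw [pvStep_badslice hstrip h2 h3]
          simp only [Bool.false_eq_true, false_iff]
          rintro ⟨hall, -⟩
          have := hall (l, f) (by simp)
          simp only [pvLineOK, if_pos hne, pvCand] at this
          exact h3p this.2.1
    · have hstrip : (PySem.Str.strip l == "") = true := by
        simp only [pvNEb, bne] at hne
        simpa using hne
      have hcands : pvCands ((l, f) :: rest) = pvCands rest := by
        simp [pvCands, List.filter_cons, hne]
      by_cases hlf : l = f
      · rw [pvStep_empty_eq hstrip hlf, ih m, hcands]
        constructor
        · rintro ⟨hrest, hcons⟩
          refine ⟨?_, hcons⟩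
          intro p hp
          rcases List.mem_cons.mp hp with h | h
          · subst h; simp only [pvLineOK, if_neg hne]; exact hlf
          · exact hrest p h
        · rintro ⟨hall, hcons⟩
          exact ⟨fun p hp => hall p (by simp [hp]), hcons⟩
      · rw [pvStep_empty_ne hstrip hlf]
        simp only [Bool.false_eq_true, false_iff]
        rintro ⟨hall, -⟩
        have := hall (l, f) (by simp)
        simp only [pvLineOK, if_neg hne] at this
        exact hlf this

-- ===== minimum-indent facts and A-side characterization =====

def pvMinInd (xs : List String) : Int :=
  (PySem.List.min? ((xs.filter (fun l => pvNEb l)).map (fun l => pvInd l)) (fun x => x)).getD 0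

theorem pvNormalizeFind_eq (xs : List String) :
    pvNormalizeFind xs = if xs.filter (fun l => pvNEb l) = [] then xs
      else xs.map (fun l =>
        if pvNEb l = true then PySem.Str.slice l (some (pvMinInd xs)) none else l) := by
  have hf : (fun l => PySem.Str.strip l != "") = (fun l => pvNEb l) := rfl
  simp only [pvNormalizeFind, pvMinInd, hf]
  split_ifs with h
  · rfl
  · apply List.map_congr_left
    intro l _
    rcases Bool.eq_false_or_eq_true (pvNEb l) with hb | hb
    · have : (PySem.Str.strip l == "") = false := by
        simp only [pvNEb, bne] at hb
        simpa using hb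
      rw [this, hb]
      simp only [Bool.false_eq_true, if_false, if_true]
      rfl
    · have : (PySem.Str.strip l == "") = true := by
        simp only [pvNEb, bne] at hb
        simpa using hb
      rw [this, hb]
      simp

theorem pvMinInd_spec (xs : List String) (h : xs.filter (fun l => pvNEb l) ≠ []) :
    (∃ l ∈ xs, pvNEb l = true ∧ pvInd l = pvMinInd xs) ∧
      (∀ l ∈ xs, pvNEb l = true → pvMinInd xs ≤ pvInd l) := by
  have hne : ((xs.filter (fun l => pvNEb l)).map (fun l => pvInd l)) ≠ [] := by
    simpa using h
  cases hmin : PySem.List.min? ((xs.filter (fun l => pvNEb l)).map (fun l => pvInd l))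
      (fun x => x) with
  | none => exact absurd ((PySem.List.min?_eq_none_iff _ _).mp hmin) hne
  | some m =>
    have hgd : pvMinInd xs = m := by simp [pvMinInd, hmin]
    have hmem := PySem.List.min?_mem hmin
    have hle := PySem.List.min?_isMin hmin
    rcases List.mem_map.mp hmem with ⟨l, hl, hlm⟩
    rcases List.mem_filter.mp hl with ⟨hlx, hlne⟩
    constructor
    · exact ⟨l, hlx, hlne, by rw [hlm, hgd]⟩
    · intro l' hl' hne'
      have : pvInd l' ∈ (xs.filter (fun l => pvNEb l)).map (fun l => pvInd l) :=
        List.mem_map.mpr ⟨l', List.mem_filter.mpr ⟨hl', hne'⟩, rfl⟩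
      rw [hgd]
      exact hle _ this

theorem pvMinInd_nonneg (xs : List String) (h : xs.filter (fun l => pvNEb l) ≠ []) :
    0 ≤ pvMinInd xs := by
  rcases (pvMinInd_spec xs h).1 with ⟨l, _, _, hl⟩
  rw [← hl]
  exact pvInd_nonneg l

theorem pvMinInd_unique (xs : List String) (h : xs.filter (fun l => pvNEb l) ≠ []) (v : Int)
    (hmem : ∃ l ∈ xs, pvNEb l = true ∧ pvInd l = v)
    (hle : ∀ l ∈ xs, pvNEb l = true → v ≤ pvInd l) : pvMinInd xs = v := by
  rcases (pvMinInd_spec xs h).1 with ⟨l, hl, hlne, hlm⟩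
  rcases hmem with ⟨l', hl', hlne', hlm'⟩
  have h1 := (pvMinInd_spec xs h).2 l' hl' hlne'
  have h2 := hle l hl hlne
  omega

-- every normalized line list with a non-empty line has one of indent 0
theorem pvNormalize_min0 (FL : List String) (h : FL.filter (fun l => pvNEb l) ≠ []) :
    ∃ f ∈ pvNormalizeFind FL, pvNEb f = true ∧ pvInd f = 0 := by
  rcases (pvMinInd_spec FL h).1 with ⟨l, hl, hlne, hlm⟩
  have h0 := pvMinInd_nonneg FL h
  have hspec := pvDedent_spec l (pvMinInd FL) h0 (by rw [hlm])
  refine ⟨PySem.Str.slice l (some (pvMinInd FL)) none, ?_, ?_, ?_⟩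
  · rw [pvNormalizeFind_eq, if_neg h]
    exact List.mem_map.mpr ⟨l, hl, by rw [hlne]; simp⟩
  · rw [hspec.1, hlne]
  · rw [hspec.2.1, hlm]; ring

-- zip helpers
theorem pvMem_zip_iff {α β : Type} {W : List α} {F : List β} {p : α × β}
    (hlen : W.length = F.length) :
    p ∈ W.zip F ↔ ∃ (i : Nat) (h1 : i < W.length) (h2 : i < F.length), p = (W[i], F[i]) := by
  constructor
  · intro hp
    rcases List.mem_iff_getElem.mp hp with ⟨i, hi, hpe⟩
    have hiW : i < W.length := by
      rw [List.length_zip] at hi; omega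
    have hiF : i < F.length := by
      rw [List.length_zip] at hi; omega
    exact ⟨i, hiW, hiF, by rw [← hpe, List.getElem_zip]⟩
  · rintro ⟨i, h1, h2, rfl⟩
    apply List.mem_iff_getElem.mpr
    exact ⟨i, by rw [List.length_zip]; omega, by rw [List.getElem_zip]⟩

theorem pvZipEq {α : Type} {W F : List α} (hlen : W.length = F.length)
    (h : ∀ p ∈ W.zip F, p.1 = p.2) : W = F := by
  apply List.ext_getElem hlen
  intro i hiW hiF
  exact h (W[i], F[i]) ((pvMem_zip_iff hlen).mpr ⟨i, hiW, hiF, rfl⟩)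

-- ===== the core per-window equivalence =====

theorem pvCore (F : List String)
    (hF : (∃ f ∈ F, pvNEb f = true) → ∃ f0 ∈ F, pvNEb f0 = true ∧ pvInd f0 = 0)
    (W : List String) (hlen : W.length = F.length) :
    pvNormalizeFind W = F ↔ pvWindowMatches none (W.zip F) = true := by
  rw [pvWindowMatches_iff, pvNormalizeFind_eq]
  by_cases hWne : W.filter (fun l => pvNEb l) = []
  · rw [if_pos hWne]
    have hWall : ∀ l ∈ W, pvNEb l = false := by
      intro l hl
      have := List.filter_eq_nil_iff.mp hWne l hl
      simpa using this
    constructor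
    · rintro rfl
      constructor
      · intro p hp
        have h1 := (List.of_mem_zip hp).1
        rcases (pvMem_zip_iff hlen).mp hp with ⟨i, hi1, hi2, rfl⟩
        simp [pvLineOK, hWall _ (List.getElem_mem hi1)]
      · intro x hx y _
        exfalso
        rcases List.mem_map.mp hx with ⟨p, hp, -⟩
        rcases List.mem_filter.mp hp with ⟨hpz, hpne⟩
        have := hWall p.1 (List.of_mem_zip hpz).1
        rw [this] at hpne
        cases hpne
    · rintro ⟨hall, -⟩
      apply pvZipEq hlen
      intro p hp
      have h := hall p hp
      have hne := hWall p.1 (List.of_mem_zip hp).1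
      simpa [pvLineOK, hne] using h
  · rw [if_neg hWne]
    have hnn := pvMinInd_nonneg W hWne
    constructor
    · intro h
      have hpair : ∀ (i : Nat) (hi : i < W.length),
          F[i]'(by omega) = (if pvNEb (W[i]) = true
            then PySem.Str.slice (W[i]) (some (pvMinInd W)) none else W[i]) := by
        intro i hi
        have := congrArg (fun xs => xs[i]?) h
        simp only [List.getElem?_map] at this
        rw [List.getElem?_eq_getElem hi] at this
        have hiF : i < F.length := by omega
        rw [List.getElem?_eq_getElem hiF] at this
        simpa using this.symm
      constructor
      · intro p hp
        rcases (pvMem_zip_iff hlen).mp hp with ⟨i, hi1, hi2, rfl⟩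
        have hp2 := hpair i hi1
        rcases Bool.eq_false_or_eq_true (pvNEb (W[i])) with hb | hb
        · -- non-empty line
          have hmin : pvMinInd W ≤ pvInd (W[i]) :=
            (pvMinInd_spec W hWne).2 _ (List.getElem_mem hi1) hb
          have hspec := pvDedent_spec (W[i]) (pvMinInd W) hnn hmin
          rw [if_pos hb] at hp2
          have hcand : pvCand (W[i], F[i]) = pvMinInd W := by
            simp only [pvCand, hp2, hspec.2.2.1]
            ring
          simp only [pvLineOK, if_pos hb, hcand]
          refine ⟨hnn, hp2.symm, ?_⟩
          by_cases h0 : pvMinInd W = 0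
          · exact Or.inl h0
          · right
            rw [pvStrIsspace_iff, pvSliceTo_toList _ _ hnn]
            refine ⟨?_, fun c hc => hspec.2.2.2 c hc⟩
            have hindle := pvInd_le_len (W[i])
            have : (pvMinInd W).toNat ≤ (W[i]).toList.length := by omega
            simp only [ne_eq, List.take_eq_nil_iff]
            push_neg
            constructor
            · omega
            · intro hnil
              rw [hnil] at hindle
              simp at hindle
              have := pvInd_nonneg (W[i])
              omega
        · rw [if_neg (by simp [hb])] at hp2
          simp only [pvLineOK, hb]
          simp only [Bool.false_eq_true, if_false]
          exact hp2.symm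
      · -- all candidates equal pvMinInd W
        have hc : ∀ x ∈ pvCands (W.zip F), x = pvMinInd W := by
          intro x hx
          rcases List.mem_map.mp hx with ⟨p, hp, rfl⟩
          rcases List.mem_filter.mp hp with ⟨hpz, hpne⟩
          rcases (pvMem_zip_iff hlen).mp hpz with ⟨i, hi1, hi2, hpe⟩
          have hb : pvNEb (W[i]) = true := by
            rw [hpe] at hpne; exact hpne
          have hmin : pvMinInd W ≤ pvInd (W[i]) :=
            (pvMinInd_spec W hWne).2 _ (List.getElem_mem hi1) hb
          have hspec := pvDedent_spec (W[i]) (pvMinInd W) hnn hmin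
          have hp2 := hpair i hi1
          rw [if_pos hb] at hp2
          rw [hpe]
          simp only [pvCand, hp2, hspec.2.2.1]
          ring
        intro x hx y hy
        simp only [Option.toList_none, List.nil_append] at hy
        rw [hc x hx, hc y hy]
    · rintro ⟨hall, hcons⟩
      -- find a non-empty line of W and its common candidate value v
      have hex : ∃ l ∈ W, pvNEb l = true := by
        rcases List.exists_mem_of_ne_nil _ hWne with ⟨l, hl⟩
        rcases List.mem_filter.mp hl with ⟨h1, h2⟩
        exact ⟨l, h1, h2⟩
      rcases hex with ⟨l₁, hl₁, hb₁⟩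
      rcases List.mem_iff_getElem.mp hl₁ with ⟨i₁, hi₁, hleq⟩
      have hi₁F : i₁ < F.length := by omega
      set v := pvCand (W[i₁], F[i₁]) with hv
      have hvmem : v ∈ pvCands (W.zip F) := by
        apply List.mem_map.mpr
        refine ⟨(W[i₁], F[i₁]), List.mem_filter.mpr ⟨?_, ?_⟩, rfl⟩
        · exact (pvMem_zip_iff hlen).mpr ⟨i₁, hi₁, hi₁F, rfl⟩
        · simpa [hleq] using hb₁
      have hcv : ∀ x ∈ pvCands (W.zip F), x = v := by
        intro x hx
        have := hcons x hx v (by simpa using hvmem)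
        exact this
      -- per-index facts
      have hidx : ∀ (i : Nat) (hi : i < W.length),
          (pvNEb (W[i]) = false ∧ W[i] = F[i]'(by omega)) ∨
          (pvNEb (W[i]) = true ∧ pvNEb (F[i]'(by omega)) = true ∧
            PySem.Str.slice (W[i]) (some v) none = F[i]'(by omega) ∧
            pvInd (W[i]) = v + pvInd (F[i]'(by omega)) ∧ v ≤ pvInd (W[i])) := by
        intro i hi
        have hiF : i < F.length := by omega
        have hmem : (W[i], F[i]) ∈ W.zip F := (pvMem_zip_iff hlen).mpr ⟨i, hi, hiF, rfl⟩
        have hok := hall _ hmem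
        rcases Bool.eq_false_or_eq_true (pvNEb (W[i])) with hb | hb
        swap
        · left
          refine ⟨hb, ?_⟩
          simpa [pvLineOK, hb] using hok
        · right
          simp only [pvLineOK, if_pos hb] at hok
          have hcmem : pvCand (W[i], F[i]) ∈ pvCands (W.zip F) := by
            apply List.mem_map.mpr
            exact ⟨(W[i], F[i]), List.mem_filter.mpr ⟨hmem, hb⟩, rfl⟩
          have hceq : pvCand (W[i], F[i]) = v := hcv _ hcmem
          rw [hceq] at hok
          have hrec := pvRecompose (W[i]) (F[i]) v (hceq ▸ hok.1) hok.2.1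
            (by
              rcases hok.2.2 with h | h
              · exact Or.inl h
              · exact Or.inr h) hb
          exact ⟨hb, hrec.1, hok.2.1, hrec.2.1, hrec.2.2⟩
      -- v is the minimum indent of W
      have hFex : ∃ f ∈ F, pvNEb f = true := by
        rcases hidx i₁ hi₁ with ⟨hb, -⟩ | ⟨-, hf, -, -, -⟩
        · rw [hleq] at hb; rw [hb] at hb₁; cases hb₁
        · exact ⟨F[i₁], List.getElem_mem hi₁F, hf⟩
      rcases hF hFex with ⟨f0, hf0F, hf0ne, hf0ind⟩
      rcases List.mem_iff_getElem.mp hf0F with ⟨i0, hi0, hf0eq⟩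
      have hi0W : i0 < W.length := by omega
      have hl0ne : pvNEb (W[i0]) = true := by
        rcases hidx i0 hi0W with ⟨hb, heq⟩ | ⟨hb, -⟩
        · exfalso
          have hff : pvNEb f0 = false := by rw [← hf0eq, ← heq]; exact hb
          rw [hff] at hf0ne
          cases hf0ne
        · exact hb
      have hl0ind : pvInd (W[i0]) = v := by
        rcases hidx i0 hi0W with ⟨hb, -⟩ | ⟨-, -, -, hind, -⟩
        · rw [hb] at hl0ne; cases hl0ne
        · rw [hind, hf0eq, hf0ind]; ring
      have hmin : pvMinInd W = v := by
        apply pvMinInd_unique W hWne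
        · exact ⟨W[i0], List.getElem_mem hi0W, hl0ne, hl0ind⟩
        · intro l hl hlne
          rcases List.mem_iff_getElem.mp hl with ⟨j, hj, rfl⟩
          rcases hidx j hj with ⟨hb, -⟩ | ⟨-, -, -, hind, hle⟩
          · rw [hb] at hlne; cases hlne
          · exact hle
      -- conclude the map equals F
      apply List.ext_getElem (by simp [hlen])
      intro i hiM hiF
      simp only [List.getElem_map]
      have hiW : i < W.length := by simpa using hiM
      rcases hidx i hiW with ⟨hb, heq⟩ | ⟨hb, -, hsl, -, -⟩
      · rw [if_neg (by simp [hb])]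
        exact heq
      · have h2 : PySem.Str.slice (W[i]) (some (pvMinInd W)) none = F[i]'(by omega) := by
          rw [hmin]; exact hsl
        rw [if_pos hb]
        exact h2

-- ===== A's string-level window test reduced to the list level =====

theorem pvJoin_pvLines (s : String) : PySem.Str.join "\n" (pvLines s) = s := by
  have h : (PySem.Str.join "\n" (pvLines s)).toList = s.toList := by
    rw [pvJoin_toList, pvLines_eq, List.map_map]
    have : (String.toList ∘ String.ofList) = id := by
      funext x; simp
    rw [this, List.map_id]
    have hnl : ("\n" : String).toList = ['\n'] := by decide
    exact hnl ▸ pvJoin_pvSplitC '\n' s.toList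
  have := congrArg String.ofList h
  rwa [String.ofList_toList, String.ofList_toList] at this

theorem pvRemoveIndentation_eq (t : String) :
    pvRemoveIndentation t = PySem.Str.join "\n" (pvNormalizeFind (pvLines t)) := by
  unfold pvRemoveIndentation pvNormalizeFind pvLines
  by_cases h : ((PySem.Str.split? t "\n").getD []).filter (fun l => PySem.Str.strip l != "") = []
  · simp only [h, if_pos rfl, reduceIte]
    exact (pvJoin_pvLines t).symm
  · simp only [if_neg h]
  
theorem pvNormalizeFind_length (xs : List String) :
    (pvNormalizeFind xs).length = xs.length := by
  rw [pvNormalizeFind_eq]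
  split_ifs <;> simp

theorem pvNormalizeFind_noNL (xs : List String) (h : ∀ l ∈ xs, '\n' ∉ l.toList) :
    ∀ f ∈ pvNormalizeFind xs, '\n' ∉ f.toList := by
  intro f hf
  rw [pvNormalizeFind_eq] at hf
  split_ifs at hf with hc
  · exact h f hf
  · rcases List.mem_map.mp hf with ⟨l, hl, rfl⟩
    split_ifs with hb
    · rw [pvSliceFrom_toList l _ (pvMinInd_nonneg xs hc)]
      intro hmem
      exact h l hl (List.drop_subset _ _ hmem)
    · exact h l hl

theorem pvAtest_iff (F' W : List String) (hW : W ≠ []) (hWnl : ∀ w ∈ W, '\n' ∉ w.toList)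
    (hFne : F' ≠ []) (hFnl : ∀ f ∈ F', '\n' ∉ f.toList) :
    pvRemoveIndentation (PySem.Str.join "\n" W) = PySem.Str.join "\n" F'
      ↔ pvNormalizeFind W = F' := by
  rw [pvRemoveIndentation_eq, pvLines_join W hW hWnl]
  constructor
  · intro h
    apply pvJoin_inj _ hFne _ hFnl h
    · intro heq
      have := pvNormalizeFind_length W
      rw [heq] at this
      simp at this
      exact hW (List.length_eq_zero_iff.mp this.symm)
    · exact pvNormalizeFind_noNL W hWnl
  · intro h; rw [h]

-- ===== loop equivalence =====

theorem pvScan_eq (F : List String) (hk : 1 ≤ F.length) : ∀ C : List String,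
    pvScan F C = ((List.range (((C.length : Int) - F.length + 1).toNat)).filter
        (fun j => pvWindowMatches none (((C.drop j).take F.length).zip F))).map
      (fun j => PySem.Str.join "\n" ((C.drop j).take F.length)) := by
  intro C
  induction C with
  | nil =>
    have : (((([] : List String).length : Int) - F.length + 1).toNat) = 0 := by
      simp; omega
    rw [this]
    simp [pvScan]
  | cons l rest ih =>
    by_cases hc : F.length ≤ (l :: rest).length
    · have hcount : ((((l :: rest).length : Int) - F.length + 1).toNat)
          = (((rest.length : Int) - F.length + 1).toNat) + 1 := by
        simp only [List.length_cons] at hc ⊢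
        omega
      rw [hcount, List.range_succ_eq_map, List.filter_cons]
      simp only [List.drop_zero]
      have hdrop : ∀ j : Nat, ((l :: rest).drop (Nat.succ j)).take F.length
          = (rest.drop j).take F.length := by
        intro j; rfl
      have hfun1 : ((fun j => pvWindowMatches none ((((l :: rest).drop j).take F.length).zip F))
          ∘ Nat.succ) = (fun j => pvWindowMatches none (((rest.drop j).take F.length).zip F)) := by
        funext j
        simp [Function.comp, hdrop]
      have hfun2 : ((fun j => PySem.Str.join "\n" (((l :: rest).drop j).take F.length))
          ∘ Nat.succ) = (fun j => PySem.Str.join "\n" ((rest.drop j).take F.length)) := by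
        funext j
        simp [Function.comp, hdrop]
      split_ifs with hm
      · rw [List.map_cons, List.filter_map, List.map_map, hfun1, hfun2, ← ih]
        show pvScan F (l :: rest) = _
        rw [pvScan, if_pos hc]
        simp [hm]
      · rw [List.filter_map, List.map_map, hfun1, hfun2, ← ih]
        show pvScan F (l :: rest) = _
        rw [pvScan, if_pos hc]
        simp [hm]
    · have hcount : ((((l :: rest).length : Int) - F.length + 1).toNat) = 0 := by
        simp only [List.length_cons] at hc ⊢
        omega
      rw [hcount]
      show pvScan F (l :: rest) = _
      rw [pvScan, if_neg hc]
      simp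

-- A's fold over pyRange in the same canonical form
theorem pvAfold_eq (C : List String) (k : Nat) (p : String → Bool) :
    (PySem.List.pyRange 0 ((C.length : Int) - (k : Int) + 1) 1).foldl
      (fun acc i =>
        if p (PySem.Str.join "\n" (PySem.List.slice C (some i) (some (i + (k : Int)))))
        then acc ++ [PySem.Str.join "\n" (PySem.List.slice C (some i) (some (i + (k : Int))))]
        else acc) []
    = ((List.range (((C.length : Int) - k + 1).toNat)).filter
        (fun j => p (PySem.Str.join "\n" ((C.drop j).take k)))).map
      (fun j => PySem.Str.join "\n" ((C.drop j).take k)) := by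
  rw [PySem.List.pyRange_one]
  rw [List.foldl_map]
  have hslice : ∀ j : Nat, PySem.List.slice C (some ((0 : Int) + (j : Nat)))
      (some (((0 : Int) + (j : Nat)) + (k : Int))) = (C.drop j).take k := by
    intro j
    have h0 : ((0 : Int) + (j : Nat)) = ((j : Nat) : Int) := by omega
    rw [h0]
    exact PySem.List.slice_natCast_add C j k
  have : (fun (acc : List String) (j : Nat) =>
      if p (PySem.Str.join "\n" (PySem.List.slice C (some ((0 : Int) + (j : Nat)))
          (some (((0 : Int) + (j : Nat)) + (k : Int)))))
      then acc ++ [PySem.Str.join "\n" (PySem.List.slice C (some ((0 : Int) + (j : Nat)))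
          (some (((0 : Int) + (j : Nat)) + (k : Int))))]
      else acc)
      = (fun (acc : List String) (j : Nat) =>
        if (fun j => p (PySem.Str.join "\n" ((C.drop j).take k))) j
        then acc ++ [(fun j => PySem.Str.join "\n" ((C.drop j).take k)) j] else acc) := by
    funext acc j
    rw [hslice j]
  rw [this, PySem.List.foldl_append_if]
  simp

theorem pvNormalize_hF (FL : List String) :
    (∃ f ∈ pvNormalizeFind FL, pvNEb f = true) →
      ∃ f0 ∈ pvNormalizeFind FL, pvNEb f0 = true ∧ pvInd f0 = 0 := by
  intro hex
  by_cases h : FL.filter (fun l => pvNEb l) = []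
  · exfalso
    rcases hex with ⟨f, hf, hfne⟩
    rw [pvNormalizeFind_eq, if_pos h] at hf
    exact List.filter_eq_nil_iff.mp h f hf hfne
  · exact pvNormalize_min0 FL h

set_option maxHeartbeats 2000000 in
theorem pvMain (content find : String) :
    indentation_flexible_replacer content find = indentation_flexible_replacer_alt content find := by
  have hA : indentation_flexible_replacer content find
      = ((List.range ((((pvLines content).length : Int) - ((pvLines find).length : Int) + 1).toNat)).filter
          (fun j => pvRemoveIndentation (PySem.Str.join "\n"
            (((pvLines content).drop j).take (pvLines find).length)) == pvRemoveIndentation find)).map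
        (fun j => PySem.Str.join "\n" (((pvLines content).drop j).take (pvLines find).length)) := by
    unfold indentation_flexible_replacer
    simp only [PySem.List.len_eq]
    rw [show (PySem.Str.split? content "\n").getD [] = pvLines content from rfl,
      show (PySem.Str.split? find "\n").getD [] = pvLines find from rfl]
    exact pvAfold_eq (pvLines content) (pvLines find).length
      (fun s => pvRemoveIndentation s == pvRemoveIndentation find)
  have hB : indentation_flexible_replacer_alt content find
      = ((List.range ((((pvLines content).length : Int) - ((pvLines find).length : Int) + 1).toNat)).filter
          (fun j => pvWindowMatches none ((((pvLines content).drop j).take (pvLines find).length).zip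
            (pvNormalizeFind (pvLines find))))).map
        (fun j => PySem.Str.join "\n" (((pvLines content).drop j).take (pvLines find).length)) := by
    have hlen := pvNormalizeFind_length (pvLines find)
    unfold indentation_flexible_replacer_alt
    rw [show (PySem.Str.split? content "\n").getD [] = pvLines content from rfl,
      show (PySem.Str.split? find "\n").getD [] = pvLines find from rfl]
    show pvScan (pvNormalizeFind (pvLines find)) (pvLines content) = _
    rw [pvScan_eq (pvNormalizeFind (pvLines find)) (by
      rw [hlen]
      have := pvLines_ne_nil find
      cases hpl : pvLines find with
      | nil => exact absurd hpl this
      | cons a t => simp) (pvLines content)]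
    rw [hlen]
  rw [hA, hB]
  apply congrArg
  apply List.filter_congr
  intro j hj
  rw [List.mem_range] at hj
  -- the window
  have hk1 : 1 ≤ (pvLines find).length := by
    have := pvLines_ne_nil find
    cases hpl : pvLines find with
    | nil => exact absurd hpl this
    | cons a t => simp
  have hjn : (j : Int) + (pvLines find).length ≤ (pvLines content).length := by omega
  have hWlen : (((pvLines content).drop j).take (pvLines find).length).length
      = (pvLines find).length := by
    rw [List.length_take, List.length_drop]
    omega
  have hWne : ((pvLines content).drop j).take (pvLines find).length ≠ [] := by
    intro h
    rw [h] at hWlen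
    simp at hWlen
    omega
  have hWnl : ∀ w ∈ ((pvLines content).drop j).take (pvLines find).length, '\n' ∉ w.toList := by
    intro w hw
    exact pv_noNL_of_mem_pvLines (List.drop_subset _ _ (List.take_subset _ _ hw))
  have hFne : pvNormalizeFind (pvLines find) ≠ [] := by
    intro h
    have := pvNormalizeFind_length (pvLines find)
    rw [h] at this
    simp at this
    omega
  have hFnl : ∀ f ∈ pvNormalizeFind (pvLines find), '\n' ∉ f.toList :=
    pvNormalizeFind_noNL _ (fun l hl => pv_noNL_of_mem_pvLines hl)
  rw [Bool.eq_iff_iff]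
  rw [beq_iff_eq]
  rw [pvRemoveIndentation_eq find]
  rw [pvAtest_iff _ _ hWne hWnl hFne hFnl]
  rw [pvCore _ (pvNormalize_hF (pvLines find)) _
    (by rw [hWlen, pvNormalizeFind_length])]

-- ===== VERDICT (by name: the statement is the Claim_ definition above) =====
theorem indentation_flexible_replacer_spec : Claim_equal_indentation_flexible_replacer := by
  intro content find _hdom
  exact pvMain content find
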